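-- pv_equiv track=rewrite | github.com/gd03champ/logrctx | logrctx/utils/reducer.py | reduce_logs
-- ===== SOURCE A (Python) =====
-- from collections import defaultdict
--
-- def reduce_logs(logs):
--     unique_logs = defaultdict(int)
--     request_methods = ['GET', 'POST', 'PUT', 'DELETE', 'PATCH', 'OPTIONS', 'HEAD']
--
--     for log in logs:
--         for method in request_methods:
--             if method in log:
--                 start_index = log.index(method)
--                 normalized_log = log[start_index:].strip()
--                 unique_logs[normalized_log] += 1
--                 break
--
--     reduced_logs = []
--     for log in logs:
--         for method in request_methods:
--             if method in log:
--                 start_index = log.index(method)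
--                 normalized_log = log[start_index:].strip()
--                 count = unique_logs[normalized_log]
--                 if count > 1:
--                     reduced_log = log[:-1] + f' (x{count})\n'
--                     unique_logs[normalized_log] = 0  # To avoid appending count multiple times
--                     reduced_log = "".join(reduced_log.split(',')[1:])
--                     reduced_logs.append(reduced_log)
--                 elif unique_logs[normalized_log] == 1:
--                     log = "".join(log.split(',')[1:])
--                     reduced_logs.append(log)
--                 break
--
--     return sorted(reduced_logs)
-- ===== SOURCE B (Python) =====
-- def reduce_logs(logs):
--     methods = ('GET', 'POST', 'PUT', 'DELETE', 'PATCH', 'OPTIONS', 'HEAD')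
--     groups = {}  # normalized log -> [first original log, count]
--     for log in logs:
--         for method in methods:
--             i = log.find(method)
--             if i != -1:
--                 norm = log[i:].strip()
--                 if norm in groups:
--                     groups[norm][1] += 1
--                 else:
--                     groups[norm] = [log, 1]
--                 break
--     out = []
--     for first, count in groups.values():
--         line = first[:-1] + f' (x{count})\n' if count > 1 else first
--         out.append(''.join(line.split(',')[1:]))
--     return sorted(out)
-- ===== Notes on version B (the rewrite author's own statement) =====
-- stated objective: simpler
-- what changed: B makes one grouping pass that stores each normalized key's first log line and count in an ordered dict, then emits one formatted line per unique key, instead of A's two full passes over the log list with a count dict that is zeroed in-place to suppress repeat emissions.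
import Mathlib
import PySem

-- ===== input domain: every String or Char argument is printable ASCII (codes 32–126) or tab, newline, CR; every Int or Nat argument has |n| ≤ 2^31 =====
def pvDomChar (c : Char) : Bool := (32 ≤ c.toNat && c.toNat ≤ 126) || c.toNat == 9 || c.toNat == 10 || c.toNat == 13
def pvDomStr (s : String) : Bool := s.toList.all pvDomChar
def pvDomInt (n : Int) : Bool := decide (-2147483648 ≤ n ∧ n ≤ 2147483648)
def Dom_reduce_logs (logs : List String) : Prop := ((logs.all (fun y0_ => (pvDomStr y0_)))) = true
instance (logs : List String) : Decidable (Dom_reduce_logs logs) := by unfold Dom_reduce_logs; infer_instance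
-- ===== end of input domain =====

-- B replaces A's two full passes (count dict zeroed in place to suppress repeats) by one grouping
-- pass storing each normalized key's first log and count, then emits one line per unique key: simpler.


-- shared string surgery both Pythons spell identically:
-- "".join(s.split(',')[1:])
def pvJoinAfterComma (s : String) : String :=
  String.ofList (PySem.Chars.join [] ((PySem.Chars.splitOn s.toList [',']).drop 1))
-- log[:-1] + f' (x{count})\n'
def pvAnnot (log : String) (count : Int) : String :=
  PySem.Str.join "" [PySem.Str.slice log none (some (-1)), " (x", PySem.Int.toStr count, ")\n"]

-- ===== PORT A =====
def pvRequestMethods : List String := ["GET", "POST", "PUT", "DELETE", "PATCH", "OPTIONS", "HEAD"]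

-- first pass inner loop: for method in request_methods: if method in log: unique_logs[norm] += 1; break
def pvCountLoop (d : PySem.Dict String Int) (log : String) : List String → PySem.Dict String Int
  | [] => d
  | m :: ms =>
    if PySem.Str.isIn m log then
      -- log.index(method) = Str.find (exact here: the method occurs in log)
      let normalized_log := PySem.Str.strip (PySem.Str.slice log (some (PySem.Str.find log m)) none)
      d.modify normalized_log 0 (· + 1)
    else pvCountLoop d log ms

-- second pass inner loop, state (unique_logs, reduced_logs)
def pvEmitLoop (d : PySem.Dict String Int) (acc : List String) (log : String) :
    List String → PySem.Dict String Int × List String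
  | [] => (d, acc)
  | m :: ms =>
    if PySem.Str.isIn m log then
      let normalized_log := PySem.Str.strip (PySem.Str.slice log (some (PySem.Str.find log m)) none)
      let count := d.getD normalized_log 0
      if count > 1 then
        (d.insert normalized_log 0, acc ++ [pvJoinAfterComma (pvAnnot log count)])
      else if d.getD normalized_log 0 == 1 then
        (d, acc ++ [pvJoinAfterComma log])
      else (d, acc)
    else pvEmitLoop d acc log ms

def reduce_logs (logs : List String) : List String :=
  let unique_logs := logs.foldl (fun d log => pvCountLoop d log pvRequestMethods) PySem.Dict.empty
  let st := logs.foldl (fun st log => pvEmitLoop st.1 st.2 log pvRequestMethods) (unique_logs, [])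
  PySem.List.sorted st.2 (fun x => x) false

-- ===== PORT B =====
def pvMethodsB : List String := ["GET", "POST", "PUT", "DELETE", "PATCH", "OPTIONS", "HEAD"]

-- grouping pass inner loop: i = log.find(method); if i != -1: bump or create [log, 1]; break
def pvGroupLoop (g : PySem.Dict String (String × Int)) (log : String) :
    List String → PySem.Dict String (String × Int)
  | [] => g
  | m :: ms =>
    let i := PySem.Str.find log m
    if i ≠ -1 then
      let norm := PySem.Str.strip (PySem.Str.slice log (some i) none)
      if g.contains norm then g.modify norm ("", 0) (fun p => (p.1, p.2 + 1))
      else g.insert norm (log, 1)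
    else pvGroupLoop g log ms

def reduce_logs_alt (logs : List String) : List String :=
  let groups := logs.foldl (fun g log => pvGroupLoop g log pvMethodsB) PySem.Dict.empty
  let out := groups.values.foldl (fun out fc =>
    let line := if fc.2 > 1 then pvAnnot fc.1 fc.2 else fc.1
    out ++ [pvJoinAfterComma line]) ([] : List String)
  PySem.List.sorted out (fun x => x) false

-- ===== PRECONDITION & SPEC =====
def Spec_reduce_logs (logs : List String) (out : List String) : Prop := out = reduce_logs_alt logs
instance (logs : List String) (out : List String) : Decidable (Spec_reduce_logs logs out) := by unfold Spec_reduce_logs; infer_instance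

-- ===== CLAIM (what is proved, stated in full; the proofs are below) =====
def Claim_equal_reduce_logs : Prop := ∀ (logs : List String), Dom_reduce_logs logs → Spec_reduce_logs logs (reduce_logs logs)

-- ===== LEMMAS AND PROOFS =====

-- the per-log key extraction both inner loops perform: first method (in list order) occurring in log
def pvExtract (log : String) : List String → Option String
  | [] => none
  | m :: ms =>
    if PySem.Str.isIn m log then
      some (PySem.Str.strip (PySem.Str.slice log (some (PySem.Str.find log m)) none))
    else pvExtract log ms

def pvKey? (log : String) : Option String := pvExtract log pvRequestMethods

-- (key, original log) pairs of the logs that contain a method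
def pvKeyed (logs : List String) : List (String × String) :=
  logs.filterMap (fun log => (pvKey? log).map (fun k => (k, log)))

def pvCnt (logs : List String) (k : String) : Int := (((pvKeyed logs).map Prod.fst).count k : Int)

def pvEmit (l : String) (c : Int) : String :=
  if c > 1 then pvJoinAfterComma (pvAnnot l c) else pvJoinAfterComma l

-- first pair for each key, in first-occurrence order, skipping keys in seen
def pvFirsts : List (String × String) → List String → List (String × String)
  | [], _ => []
  | (k, l) :: rest, seen =>
    if k ∈ seen then pvFirsts rest seen else (k, l) :: pvFirsts rest (k :: seen)

def pvStepA (st : PySem.Dict String Int × List String) (p : String × String) :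
    PySem.Dict String Int × List String :=
  let count := st.1.getD p.1 0
  if count > 1 then (st.1.insert p.1 0, st.2 ++ [pvJoinAfterComma (pvAnnot p.2 count)])
  else if st.1.getD p.1 0 == 1 then (st.1, st.2 ++ [pvJoinAfterComma p.2])
  else (st.1, st.2)

def pvStepB (g : PySem.Dict String (String × Int)) (p : String × String) :
    PySem.Dict String (String × Int) :=
  if g.contains p.1 then g.modify p.1 ("", 0) (fun q => (q.1, q.2 + 1))
  else g.insert p.1 (p.2, 1)

theorem pvCountLoop_eq (d : PySem.Dict String Int) (log : String) (ms : List String) :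
    pvCountLoop d log ms =
      match pvExtract log ms with
      | none => d
      | some k => d.modify k 0 (· + 1) := by
  induction ms with
  | nil => rfl
  | cons m ms ih =>
    simp only [pvCountLoop, pvExtract]
    split
    · rfl
    · exact ih

theorem pvEmitLoop_eq (d : PySem.Dict String Int) (acc : List String) (log : String) (ms : List String) :
    pvEmitLoop d acc log ms =
      match pvExtract log ms with
      | none => (d, acc)
      | some k =>
        let count := d.getD k 0
        if count > 1 then (d.insert k 0, acc ++ [pvJoinAfterComma (pvAnnot log count)])
        else if d.getD k 0 == 1 then (d, acc ++ [pvJoinAfterComma log])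
        else (d, acc) := by
  induction ms with
  | nil => rfl
  | cons m ms ih =>
    simp only [pvEmitLoop, pvExtract]
    split
    · rfl
    · exact ih

theorem pvGroupLoop_eq (g : PySem.Dict String (String × Int)) (log : String) (ms : List String) :
    pvGroupLoop g log ms =
      match pvExtract log ms with
      | none => g
      | some k =>
        if g.contains k then g.modify k ("", 0) (fun p => (p.1, p.2 + 1))
        else g.insert k (log, 1) := by
  induction ms with
  | nil => rfl
  | cons m ms ih =>
    simp only [pvGroupLoop, pvExtract]
    by_cases h : PySem.Str.isIn m log = true
    · have hf : PySem.Str.find log m ≠ -1 :=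
        (PySem.Str.find_ne_neg_one_iff log m).mpr ((PySem.Str.isIn_iff_infix m log).mp h)
      rw [if_pos hf, if_pos h]
    · have hf : ¬ PySem.Str.find log m ≠ -1 := by
        intro hc
        exact h ((PySem.Str.isIn_iff_infix m log).mpr ((PySem.Str.find_ne_neg_one_iff log m).mp hc))
      rw [if_neg hf, if_neg h]
      exact ih

-- a fold over logs that skips method-less logs is a fold over pvKeyed
theorem pvFoldl_keyed {σ : Type} (F : σ → String → String → σ) (logs : List String) (s : σ) :
    logs.foldl (fun s log =>
        match pvKey? log with
        | none => s
        | some k => F s k log) s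
      = (pvKeyed logs).foldl (fun s p => F s p.1 p.2) s := by
  induction logs generalizing s with
  | nil => rfl
  | cons log logs ih =>
    simp only [List.foldl_cons, pvKeyed, List.filterMap_cons]
    cases h : pvKey? log <;> simp only [Option.map_none, Option.map_some] <;>
      exact ih _

theorem pvFirsts_key_not_seen {p : String × String} :
    ∀ (rest : List (String × String)) (seen : List String),
      p ∈ pvFirsts rest seen → p.1 ∉ seen := by
  intro rest
  induction rest with
  | nil => intro seen h; simp [pvFirsts] at h
  | cons q rest ih =>
    intro seen h
    obtain ⟨k, l⟩ := q
    simp only [pvFirsts] at h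
    split at h
    · exact ih seen h
    · rcases List.mem_cons.mp h with h1 | h2
      · subst h1; assumption
      · intro hm; exact ih _ h2 (List.mem_cons_of_mem _ hm)

theorem pvFirsts_congr (rest : List (String × String)) (s t : List String)
    (h : ∀ x, x ∈ s ↔ x ∈ t) : pvFirsts rest s = pvFirsts rest t := by
  induction rest generalizing s t with
  | nil => rfl
  | cons q rest ih =>
    obtain ⟨k, l⟩ := q
    simp only [pvFirsts]
    by_cases hk : k ∈ s
    · rw [if_pos hk, if_pos ((h k).mp hk)]
      exact ih s t h
    · rw [if_neg hk, if_neg (fun hc => hk ((h k).mpr hc))]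
      refine congrArg _ (ih _ _ ?_)
      intro x
      simp only [List.mem_cons]
      exact or_congr Iff.rfl (h x)

-- A's second pass, characterized
theorem pvEmit_main (cnt : String → Int) :
    ∀ (rest : List (String × String)) (d : PySem.Dict String Int) (seen : List String)
      (acc : List String),
      (∀ k ∈ rest.map Prod.fst, d.getD k 0 = if k ∈ seen then 0 else cnt k) →
      (∀ k, (if k ∈ seen then 1 else 0) + ((rest.map Prod.fst).count k : Int) ≤ cnt k) →
      (rest.foldl pvStepA (d, acc)).2
        = acc ++ (pvFirsts rest seen).map (fun p => pvEmit p.2 (cnt p.1)) := by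
  intro rest
  induction rest with
  | nil => intro d seen acc _ _; simp [pvFirsts]
  | cons q rest ih =>
    intro d seen acc h1 h2
    obtain ⟨k, l⟩ := q
    have hdk : d.getD k 0 = if k ∈ seen then 0 else cnt k := h1 k (by simp)
    have hcnt : ((rest.map Prod.fst).count k : Int) + 1 ≤ cnt k := by
      have := h2 k
      simp only [List.map_cons, List.count_cons, beq_self_eq_true, if_true] at this
      split at this <;> push_cast at this ⊢ <;> omega
    by_cases hk : k ∈ seen
    · -- already emitted (count zeroed): state unchanged
      have hz : d.getD k 0 = 0 := by rw [hdk, if_pos hk]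
      have hstep : pvStepA (d, acc) (k, l) = (d, acc) := by
        simp [pvStepA, hz]
      rw [List.foldl_cons, hstep,
        ih d seen acc (fun k' hk' => h1 k' (by simp [hk'])) ?_]
      · simp [pvFirsts, if_pos hk]
      · intro k'
        have := h2 k'
        by_cases hke : k' = k
        · subst hke
          simp only [List.map_cons] at this
          rw [List.count_cons_self] at this
          by_cases hs : k' ∈ seen
          · rw [if_pos hs] at this ⊢; push_cast at this ⊢; omega
          · rw [if_neg hs] at this ⊢; push_cast at this ⊢; omega
        · simp only [List.map_cons] at this
          rw [List.count_cons_of_ne (Ne.symm hke)] at this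
          by_cases hs : k' ∈ seen
          · rw [if_pos hs] at this ⊢; omega
          · rw [if_neg hs] at this ⊢; omega
    · have hck : d.getD k 0 = cnt k := by rw [hdk, if_neg hk]
      by_cases hgt : cnt k > 1
      · -- first occurrence of a repeated key: emit annotated line, zero the count
        have hstep : pvStepA (d, acc) (k, l)
            = (d.insert k 0, acc ++ [pvJoinAfterComma (pvAnnot l (cnt k))]) := by
          simp [pvStepA, hck, if_pos hgt]
        rw [List.foldl_cons, hstep, ih (d.insert k 0) (k :: seen) _ ?_ ?_]
        · simp [pvFirsts, if_neg hk, pvEmit, if_pos hgt]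
        · intro k' hk'
          rw [PySem.Dict.getD_insert]
          by_cases hke : k' = k
          · simp [hke]
          · rw [if_neg hke, h1 k' (by simp [hk'])]
            simp [List.mem_cons, hke]
        · intro k'
          by_cases hke : k' = k
          · subst hke; simp only [List.mem_cons, true_or, if_true]; omega
          · have := h2 k'
            simp only [List.map_cons] at this
            rw [List.count_cons_of_ne (Ne.symm hke)] at this
            simp only [List.mem_cons, hke, false_or]
            by_cases hs : k' ∈ seen
            · rw [if_pos hs] at this ⊢; omega
            · rw [if_neg hs] at this ⊢; omega
      · -- singleton key: emit the plain line; the key cannot reappear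
        have h1k : cnt k = 1 := by omega
        have hrest0 : (rest.map Prod.fst).count k = 0 := by omega
        have hknot : k ∉ rest.map Prod.fst := List.count_eq_zero.mp hrest0
        have hstep : pvStepA (d, acc) (k, l) = (d, acc ++ [pvJoinAfterComma l]) := by
          simp [pvStepA, hck, h1k]
        rw [List.foldl_cons, hstep, ih d (k :: seen) _ ?_ ?_]
        · simp [pvFirsts, if_neg hk, pvEmit, h1k]
        · intro k' hk'
          have hke : k' ≠ k := fun hc => hknot (hc ▸ hk')
          rw [h1 k' (by simp [hk'])]
          simp [List.mem_cons, hke]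
        · intro k'
          by_cases hke : k' = k
          · subst hke
            simp only [List.mem_cons, true_or, if_true]
            push_cast [hrest0]
            omega
          · have := h2 k'
            simp only [List.map_cons] at this
            rw [List.count_cons_of_ne (Ne.symm hke)] at this
            simp only [List.mem_cons, hke, false_or]
            by_cases hs : k' ∈ seen
            · rw [if_pos hs] at this ⊢; omega
            · rw [if_neg hs] at this ⊢; omega

-- B's grouping pass, characterized
theorem pvGroup_main :
    ∀ (rest : List (String × String)) (g : PySem.Dict String (String × Int)),
      g.keys.Nodup →
      (rest.foldl pvStepB g).items
        = g.items.map (fun e => (e.1, (e.2.1, e.2.2 + ((rest.map Prod.fst).count e.1 : Int))))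
          ++ (pvFirsts rest g.keys).map (fun p => (p.1, (p.2, ((rest.map Prod.fst).count p.1 : Int)))) := by
  intro rest
  induction rest with
  | nil =>
    intro g _
    simp [pvFirsts]
  | cons q rest ih =>
    intro g hnd
    obtain ⟨k, l⟩ := q
    by_cases hc : g.contains k = true
    · -- key already present: bump its count in place
      have hkmem : k ∈ g.keys := (PySem.Dict.contains_iff_mem_keys g k).mp hc
      have hstep : pvStepB g (k, l) = g.insert k ((g.getD k ("", 0)).1, (g.getD k ("", 0)).2 + 1) := by
        simp only [pvStepB, hc, if_true]
        rfl
      have hkeys : (g.insert k ((g.getD k ("", 0)).1, (g.getD k ("", 0)).2 + 1)).keys = g.keys := by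
        rw [PySem.Dict.keys_insert_of_contains g _ hc]
      rw [List.foldl_cons, hstep, ih _ (by rw [hkeys]; exact hnd), hkeys,
        PySem.Dict.items_insert_of_contains g _ hc, List.map_map]
      have hfirsts : pvFirsts ((k, l) :: rest) g.keys = pvFirsts rest g.keys := by
        simp [pvFirsts, hkmem]
      rw [hfirsts]
      congr 1
      · refine List.map_congr_left (fun e he => ?_)
        by_cases hek : e.1 = k
        · have hev : (k, e.2) ∈ g.items := by
            have : e = (k, e.2) := by rw [← hek]
            rwa [← this]
          have hgd : g.getD k ("", 0) = e.2 := PySem.Dict.getD_of_mem_items g hev hnd _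
          simp only [Function.comp_apply, hek, beq_self_eq_true, if_true, hgd]
          simp only [List.map_cons, List.count_cons_self]
          refine congrArg _ ?_
          refine congrArg _ ?_
          push_cast
          omega
        · have hbe : (e.1 == k) = false := beq_eq_false_iff_ne.mpr hek
          simp only [Function.comp_apply, hbe, Bool.false_eq_true, if_false, List.map_cons]
          rw [List.count_cons_of_ne (Ne.symm hek)]
      · refine List.map_congr_left (fun p hp => ?_)
        have hpk : p.1 ≠ k := fun hc' => pvFirsts_key_not_seen rest g.keys hp (hc' ▸ hkmem)
        simp only [List.map_cons]
        rw [List.count_cons_of_ne (Ne.symm hpk)]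
    · -- new key: append it with its first log and count 1
      have hkmem : k ∉ g.keys := fun hm => by
        rw [(PySem.Dict.contains_iff_mem_keys g k).mpr hm] at hc
        exact hc rfl
      have hstep : pvStepB g (k, l) = g.insert k (l, 1) := by
        simp only [pvStepB]
        rw [if_neg (by simp [hc])]
      have hcf : g.contains k = false := by
        cases h' : g.contains k
        · rfl
        · exact absurd h' hc
      have hkeys : (g.insert k (l, 1)).keys = g.keys ++ [k] :=
        PySem.Dict.keys_insert_of_not_contains g _ hcf
      have hnd' : (g.insert k (l, 1)).keys.Nodup := PySem.Dict.nodup_keys_insert g k (l, 1) hnd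
      rw [List.foldl_cons, hstep, ih _ hnd', hkeys,
        PySem.Dict.items_insert_of_not_contains g _ hcf]
      have hfirsts : pvFirsts ((k, l) :: rest) g.keys = (k, l) :: pvFirsts rest (k :: g.keys) := by
        simp [pvFirsts, hkmem]
      rw [hfirsts,
        pvFirsts_congr rest (g.keys ++ [k]) (k :: g.keys) (by intro x; simp [or_comm]),
        List.map_append]
      rw [List.append_assoc]
      congr 1
      · refine List.map_congr_left (fun e he => ?_)
        have hek : e.1 ≠ k := fun hc' => hkmem (hc' ▸ List.mem_map_of_mem he)
        simp only [List.map_cons]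
        rw [List.count_cons_of_ne (Ne.symm hek)]
      · simp only [List.map_cons, List.map_nil, List.singleton_append]
        refine congrArg₂ _ ?_ ?_
        · rw [List.count_cons_self]
          refine congrArg _ (congrArg _ ?_)
          push_cast
          omega
        · refine List.map_congr_left (fun p hp => ?_)
          have hpk : p.1 ≠ k := fun hc' => by
            have := pvFirsts_key_not_seen rest (k :: g.keys) hp
            exact this (hc' ▸ List.mem_cons_self)
          rw [List.count_cons_of_ne (Ne.symm hpk)]

theorem pvA_char (logs : List String) :
    reduce_logs logs
      = PySem.List.sorted ((pvFirsts (pvKeyed logs) []).map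
          (fun p => pvEmit p.2 (pvCnt logs p.1))) (fun x => x) false := by
  unfold reduce_logs
  have hcount : (fun (d : PySem.Dict String Int) (log : String) => pvCountLoop d log pvRequestMethods)
      = (fun d log => match pvKey? log with
          | none => d
          | some k => d.modify k 0 (· + 1)) := by
    funext d log
    exact pvCountLoop_eq d log pvRequestMethods
  have hemit : (fun (st : PySem.Dict String Int × List String) (log : String) =>
        pvEmitLoop st.1 st.2 log pvRequestMethods)
      = (fun st log => match pvKey? log with
          | none => st
          | some k => pvStepA st (k, log)) := by
    funext st log
    rw [pvEmitLoop_eq]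
    unfold pvKey?
    cases pvExtract log pvRequestMethods <;> rfl
  rw [hcount, hemit]
  simp only [pvFoldl_keyed (F := fun (d : PySem.Dict String Int) (k : String) (_ : String) => d.modify k 0 (· + 1)),
    pvFoldl_keyed (F := fun (st : PySem.Dict String Int × List String) (k log : String) => pvStepA st (k, log))]
  have hstep : (fun (st : PySem.Dict String Int × List String) (p : String × String) =>
      pvStepA st (p.1, p.2)) = pvStepA := by
    funext st p
    rfl
  rw [hstep]
  rw [pvEmit_main (pvCnt logs) (pvKeyed logs) _ [] [] ?_ ?_]
  · rw [List.nil_append]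
  · intro k _
    rw [if_neg (List.not_mem_nil)]
    rw [← List.foldl_map (f := Prod.fst)
        (g := fun (d : PySem.Dict String Int) (x : String) => d.modify x 0 (· + 1)),
      PySem.Dict.getD_foldl_modify_add_one, PySem.Dict.getD_empty]
    simp [pvCnt]
  · intro k
    rw [if_neg (List.not_mem_nil)]
    simp [pvCnt]

theorem pvB_char (logs : List String) :
    reduce_logs_alt logs
      = PySem.List.sorted ((pvFirsts (pvKeyed logs) []).map
          (fun p => pvJoinAfterComma
            (if pvCnt logs p.1 > 1 then pvAnnot p.2 (pvCnt logs p.1) else p.2))) (fun x => x) false := by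
  unfold reduce_logs_alt
  have hgrp : (fun (g : PySem.Dict String (String × Int)) (log : String) =>
        pvGroupLoop g log pvMethodsB)
      = (fun g log => match pvKey? log with
          | none => g
          | some k => pvStepB g (k, log)) := by
    funext g log
    rw [show pvMethodsB = pvRequestMethods from rfl, pvGroupLoop_eq]
    unfold pvKey?
    cases pvExtract log pvRequestMethods <;> rfl
  rw [hgrp]
  simp only [pvFoldl_keyed (F := fun (g : PySem.Dict String (String × Int)) (k log : String) => pvStepB g (k, log))]
  have hstep : (fun (g : PySem.Dict String (String × Int)) (p : String × String) =>
      pvStepB g (p.1, p.2)) = pvStepB := by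
    funext g p
    rfl
  rw [hstep]
  have hvals : ((pvKeyed logs).foldl pvStepB PySem.Dict.empty).values
      = ((pvKeyed logs).foldl pvStepB PySem.Dict.empty).items.map (·.2) := rfl
  rw [hvals, pvGroup_main (pvKeyed logs) PySem.Dict.empty (by rw [PySem.Dict.keys_empty]; exact List.nodup_nil)]
  rw [show (PySem.Dict.empty : PySem.Dict String (String × Int)).items = [] from rfl]
  rw [List.map_nil, List.nil_append, PySem.Dict.keys_empty, List.map_map,
    PySem.List.foldl_append_singleton_eq_map, List.nil_append, List.map_map]
  rfl

-- ===== VERDICT (by name: the statement is the Claim_ definition above) =====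
theorem reduce_logs_spec : Claim_equal_reduce_logs := by
  intro logs _
  unfold Spec_reduce_logs
  rw [pvA_char, pvB_char]
  refine congrArg (fun l => PySem.List.sorted l (fun x => x) false) ?_
  refine List.map_congr_left (fun p _ => ?_)
  unfold pvEmit
  rw [apply_ite pvJoinAfterComma]
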